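-- pv_equiv track=rewrite | github.com/S0LD13R-CMD/Diff-Tool | visualization.py | _highlight_segments
-- ===== SOURCE A (Python) =====
-- _TERM_CODE_YELLOW = 33  # For highlighting changes within lines
--
-- def _color(content, term_code):
--     """Colors the content using the given Terminal code."""
--     return f"\x1b[{term_code}m{content}\x1b[0m"
--
-- def _yellow(content):
--     """Colors the text in yellow."""
--     return _color(content, _TERM_CODE_YELLOW)
--
-- def _highlight_segments(content, diff_indices):
--     """Highlights specific comma-separated segments in the content string."""
--     if not diff_indices:
--         return content
--
--     segments = content.split(',')
--     highlighted_segments = []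
--
--     for i, segment in enumerate(segments):
--         if i in diff_indices:
--             # Convert to string in case it's a numeric type
--             highlighted_segments.append(_yellow(str(segment)))
--         else:
--             highlighted_segments.append(segment)
--
--     return ','.join(highlighted_segments)
-- ===== SOURCE B (Python) =====
-- _TERM_CODE_YELLOW = 33  # For highlighting changes within lines
--
-- def _color(content, term_code):
--     """Colors the content using the given Terminal code."""
--     return f"\x1b[{term_code}m{content}\x1b[0m"
--
-- def _yellow(content):
--     """Colors the text in yellow."""
--     return _color(content, _TERM_CODE_YELLOW)
--
-- def _highlight_segments(content, diff_indices):
--     """Highlights specific comma-separated segments in the content string."""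
--     if not diff_indices:
--         return content
--     segments = content.split(',')
--     n = len(segments)
--     for i in dict.fromkeys(diff_indices):  # dedupe so no segment is wrapped twice
--         if 0 <= i < n:
--             segments[i] = _yellow(segments[i])
--     return ','.join(segments)
-- ===== Notes on version B (the rewrite author's own statement) =====
-- stated objective: alternative
-- what changed: Instead of scanning every segment with an 'i in diff_indices' membership test, B iterates over the deduplicated diff indices and scatter-writes the highlighted value into the segment list in place, then joins.
import Mathlib
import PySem

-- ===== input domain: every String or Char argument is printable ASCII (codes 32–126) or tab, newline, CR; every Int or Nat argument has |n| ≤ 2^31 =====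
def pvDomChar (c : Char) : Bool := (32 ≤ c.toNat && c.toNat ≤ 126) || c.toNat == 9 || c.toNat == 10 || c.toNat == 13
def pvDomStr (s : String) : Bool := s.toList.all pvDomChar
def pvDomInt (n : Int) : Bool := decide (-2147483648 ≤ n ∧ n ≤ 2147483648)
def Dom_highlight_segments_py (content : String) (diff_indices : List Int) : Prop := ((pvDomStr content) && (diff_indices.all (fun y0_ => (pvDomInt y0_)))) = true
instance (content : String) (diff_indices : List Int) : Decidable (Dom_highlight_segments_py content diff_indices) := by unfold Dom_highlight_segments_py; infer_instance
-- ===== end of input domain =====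

-- B changes the iteration domain: instead of A's scan over every segment with a membership
-- test, B walks the deduplicated diff indices and scatter-writes highlighted segments in place
-- (objective: alternative decomposition, same result).

-- ===== PORT A =====
-- _color(content, term_code) = f"\x1b[{term_code}m{content}\x1b[0m"  (on code points)
def pvColor (cs : List Char) (term_code : Int) : List Char :=
  "\x1b[".toList ++ (PySem.Int.toStr term_code).toList ++ "m".toList ++ cs ++ "\x1b[0m".toList

-- _yellow(content) = _color(content, 33)
def pvYellow (cs : List Char) : List Char := pvColor cs 33

def highlight_segments_py (content : String) (diff_indices : List Int) : String :=
  if diff_indices = [] then content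
  else
    let segments := PySem.Chars.splitOn content.toList [','];
    let highlighted_segments :=
      (PySem.List.enumerate segments).foldl
        (fun acc p => acc ++ [if p.1 ∈ diff_indices then pvYellow p.2 else p.2]) [];
    String.ofList (PySem.Chars.join [','] highlighted_segments)

-- ===== PORT B =====
def highlight_segments_py_alt (content : String) (diff_indices : List Int) : String :=
  if diff_indices = [] then content
  else
    let segments := PySem.Chars.splitOn content.toList [','];
    let n := PySem.List.len segments;
    let segments' :=
      (PySem.List.dedup diff_indices).foldl
        (fun segs i =>
          if 0 ≤ i ∧ i < n then
            PySem.List.pySetD segs i (pvYellow (PySem.List.pyGetD segs i []))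
          else segs)
        segments;
    String.ofList (PySem.Chars.join [','] segments')

-- ===== PRECONDITION & SPEC =====
def Spec_highlight_segments_py (content : String) (diff_indices : List Int) (out : String) : Prop := out = highlight_segments_py_alt content diff_indices
instance (content : String) (diff_indices : List Int) (out : String) : Decidable (Spec_highlight_segments_py content diff_indices out) := by unfold Spec_highlight_segments_py; infer_instance

-- ===== CLAIM (what is proved, stated in full; the proofs are below) =====
def Claim_equal_highlight_segments_py : Prop := ∀ (content : String) (diff_indices : List Int), Dom_highlight_segments_py content diff_indices → Spec_highlight_segments_py content diff_indices (highlight_segments_py content diff_indices)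

-- ===== LEMMAS AND PROOFS =====

-- After B's scatter loop over a duplicate-free index list, position j holds the highlighted
-- segment iff (j : Int) is in the index list; all other positions are untouched.
theorem pvScatter_getElem? (idxs : List Int) (segs : List (List Char)) (n : Int)
    (hn : n = PySem.List.len segs) (hnd : idxs.Nodup) (j : Nat) :
    (idxs.foldl
        (fun segs i =>
          if 0 ≤ i ∧ i < n then
            PySem.List.pySetD segs i (pvYellow (PySem.List.pyGetD segs i []))
          else segs)
        segs)[j]? =
      (segs[j]?).map (fun s => if (j : Int) ∈ idxs then pvYellow s else s) := by
  induction idxs generalizing segs with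
  | nil => simp
  | cons i t ih =>
    simp only [List.foldl_cons]
    rcases List.nodup_cons.mp hnd with ⟨hi, hnt⟩
    by_cases hv : 0 ≤ i ∧ i < n
    · rw [if_pos hv]
      have hlen : i.toNat < segs.length := by
        simp [PySem.List.len_eq] at hn; omega
      have hset : PySem.List.pySetD segs i (pvYellow (PySem.List.pyGetD segs i []))
          = segs.set i.toNat (pvYellow segs[i.toNat]) := by
        rw [PySem.List.pySetD_of_nonneg segs _ hv.1,
            PySem.List.pyGetD_eq_getElem segs [] hv.1 (by simp [PySem.List.len_eq] at hn; omega)]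
      rw [hset, ih _ (by simpa [PySem.List.len_eq] using hn) hnt]
      by_cases hj : j = i.toNat
      · have hcast : ((i.toNat : Nat) : Int) = i := Int.toNat_of_nonneg hv.1
        have hjt : ((i.toNat : Nat) : Int) ∉ t := by rw [hcast]; exact hi
        rw [hj]
        simp [hlen, hcast]
        exact fun h => absurd h hi
      · have hji : (j : Int) ≠ i := by omega
        rw [List.getElem?_set_ne (by omega)]
        simp [hji]
    · rw [if_neg hv]
      rw [ih _ hn hnt]
      by_cases hjl : j < segs.length
      · have hji : (j : Int) ≠ i := by
          intro h; apply hv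
          constructor
          · omega
          · simp [PySem.List.len_eq] at hn; omega
        simp [hji]
      · simp [List.getElem?_eq_none (by omega : segs.length ≤ j)]

-- A's append-fold over enumerate, read back pointwise.
theorem pvGather_getElem? (diff_indices : List Int) (segs : List (List Char)) (j : Nat) :
    ((PySem.List.enumerate segs).foldl
        (fun acc p => acc ++ [if p.1 ∈ diff_indices then pvYellow p.2 else p.2]) [])[j]? =
      (segs[j]?).map (fun s => if (j : Int) ∈ diff_indices then pvYellow s else s) := by
  rw [PySem.List.foldl_append_singleton_eq_map]
  simp only [List.nil_append, List.getElem?_map, PySem.List.getElem?_enumerate]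
  cases h : segs[j]? <;> simp

-- The two segment lists are equal elementwise, hence equal.
theorem pvLists_eq (content : String) (diff_indices : List Int) :
    ((PySem.List.enumerate (PySem.Chars.splitOn content.toList [','])).foldl
        (fun acc p => acc ++ [if p.1 ∈ diff_indices then pvYellow p.2 else p.2]) []) =
      ((PySem.List.dedup diff_indices).foldl
        (fun segs i =>
          if 0 ≤ i ∧ i < PySem.List.len (PySem.Chars.splitOn content.toList [',']) then
            PySem.List.pySetD segs i (pvYellow (PySem.List.pyGetD segs i []))
          else segs)
        (PySem.Chars.splitOn content.toList [','])) := by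
  apply List.ext_getElem?
  intro j
  rw [pvGather_getElem?,
      pvScatter_getElem? (PySem.List.dedup diff_indices) _ _ rfl
        (PySem.List.nodup_dedup diff_indices) j]
  cases h : (PySem.Chars.splitOn content.toList [','])[j]? <;> simp

-- ===== VERDICT (by name: the statement is the Claim_ definition above) =====
theorem highlight_segments_py_spec : Claim_equal_highlight_segments_py := by
  intro content diff_indices _
  unfold Spec_highlight_segments_py highlight_segments_py highlight_segments_py_alt
  by_cases h : diff_indices = []
  · simp [h]
  · simp only [if_neg h]
    rw [pvLists_eq content diff_indices]
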